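-- pv_equiv track=rewrite | github.com/codebyhans/ragathon | src/ragathon/chunking/sentence.py | _fix_not_capitalized_sentences
-- ===== SOURCE A (Python) =====
-- from typing import List, Optional, Protocol
--
-- def _fix_not_capitalized_sentences(raw_sentences: List[str]) -> List[str]:
--     """Fix sentences that are not capitalized.
--
--     Args:
--         raw_sentences (List[str]): List of sentences.
--
--     Returns:
--         List[str]: List of sentences.
--     """
--
--     new_sentences = []
--
--     for raw_sentence in raw_sentences:
--         if raw_sentence[0].capitalize() != raw_sentence[0]:
--             # if the first letter is not capitalized, it is not a new sentence
--             if len(new_sentences) > 0: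
--                 new_sentences[-1] += " " + raw_sentence
--             else:
--                 new_sentences.append(raw_sentence)
--         else:
--             new_sentences.append(raw_sentence)
--
--     return new_sentences
-- ===== SOURCE B (Python) =====
-- from typing import List
--
--
-- def _fix_not_capitalized_sentences(raw_sentences: List[str]) -> List[str]:
--     """Two-pointer run scan: find each maximal run [i:j] of sentences whose
--     continuations start lowercase, and join the run with ' ' once."""
--     out = []
--     i = 0
--     n = len(raw_sentences)
--     while i < n:
--         j = i + 1
--         while j < n and raw_sentences[j][0].capitalize() != raw_sentences[j][0]:
--             j += 1
--         out.append(" ".join(raw_sentences[i:j]))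
--         i = j
--     return out
-- ===== Notes on version B (the rewrite author's own statement) =====
-- stated objective: faster
-- what changed: B replaces A's element-wise merge (appending each lowercase-starting sentence onto the last accumulated string with '+=') by a two-pointer run scan: an index loop finds each maximal run raw[i:j] whose continuations start lowercase and joins that slice with ' ' once per run.
import Mathlib
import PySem

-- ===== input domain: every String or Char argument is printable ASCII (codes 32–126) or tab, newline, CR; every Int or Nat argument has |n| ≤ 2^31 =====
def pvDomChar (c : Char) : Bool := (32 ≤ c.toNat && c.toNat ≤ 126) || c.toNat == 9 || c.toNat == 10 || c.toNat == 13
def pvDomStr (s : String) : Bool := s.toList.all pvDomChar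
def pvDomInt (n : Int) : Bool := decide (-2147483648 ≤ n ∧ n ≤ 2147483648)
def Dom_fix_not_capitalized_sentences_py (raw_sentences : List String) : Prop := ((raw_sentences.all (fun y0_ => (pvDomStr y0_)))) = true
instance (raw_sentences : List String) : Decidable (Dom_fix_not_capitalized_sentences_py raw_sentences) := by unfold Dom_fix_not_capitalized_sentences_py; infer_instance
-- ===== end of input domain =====

-- B scans with two index pointers for maximal runs of lowercase-starting continuations and
-- joins each run's slice once, instead of A's per-element merge into the accumulator's last
-- string; the return values are proved equal on lists of nonempty strings.

-- ===== PORT A =====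
-- s[0].capitalize() != s[0] as an Option Bool: none = IndexError on the empty string.
-- Exact on the printable-ASCII domain, where .capitalize() of a 1-char string is PySem.Chars.upperChar.
def pvCapNe (s : String) : Option Bool :=
  (PySem.List.pyGet? s.toList 0).map (fun c => PySem.Chars.upperChar c != c)

-- new_sentences[-1] += t  (append t to the last element)
def pvAddLast : List String → String → List String
  | [], _ => []
  | [x], t => [x ++ t]
  | x :: y :: xs, t => x :: pvAddLast (y :: xs) t

-- the body of A's for-loop
def pvStepA (new_sentences : List String) (raw_sentence : String) : List String :=
  match pvCapNe raw_sentence with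
  | none => new_sentences   -- Python raises IndexError here; excluded by Pre_
  | some true =>
      if new_sentences.length > 0 then
        pvAddLast new_sentences (" " ++ raw_sentence)
      else new_sentences ++ [raw_sentence]
  | some false => new_sentences ++ [raw_sentence]

def fix_not_capitalized_sentences_py (raw_sentences : List String) : List String :=
  raw_sentences.foldl pvStepA []

-- ===== PORT B =====
-- raw_sentences[j][0].capitalize() != raw_sentences[j][0], as a Bool (j always in range when tested;
-- the none/IndexError case of the inner s[0] is excluded by Pre_ and rendered as false)
def pvLowerB (s : String) : Bool :=
  match PySem.List.pyGet? s.toList 0 with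
  | some c => PySem.Chars.upperChar c != c
  | none => false

-- inner while: advance j over the run of lowercase-starting sentences
-- (fuel is a pure totality guard: raw.length steps always suffice, the loop body is unchanged)
def pvFindJ (raw : List String) : Nat → Nat → Nat
  | 0, j => j
  | fuel + 1, j =>
      if j < raw.length then
        if pvLowerB (raw.getD j "") then pvFindJ raw fuel (j + 1) else j
      else j

-- outer while over i, appending one joined run per iteration (fuel as above)
def pvOuter (raw : List String) : Nat → Nat → List String → List String
  | 0, _, out => out
  | fuel + 1, i, out =>
      if i < raw.length then
        let j := pvFindJ raw raw.length (i + 1)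
        pvOuter raw fuel j (out ++ [PySem.Str.join " " (PySem.List.slice raw (some (i : Int)) (some (j : Int)))])
      else out

def fix_not_capitalized_sentences_py_alt (raw_sentences : List String) : List String :=
  pvOuter raw_sentences raw_sentences.length 0 []

-- ===== PRECONDITION & SPEC =====
-- Pre_ excludes lists containing an empty string, on which A raises IndexError at raw_sentence[0].
def Pre_fix_not_capitalized_sentences_py (raw_sentences : List String) : Prop :=
  ∀ s ∈ raw_sentences, s ≠ ""
instance (raw_sentences : List String) : Decidable (Pre_fix_not_capitalized_sentences_py raw_sentences) := by unfold Pre_fix_not_capitalized_sentences_py; infer_instance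
def pvWitness_fix_not_capitalized_sentences_py : List String := ["Hello", "world", "Bye"]

def Spec_fix_not_capitalized_sentences_py (raw_sentences : List String) (out : List String) : Prop := out = fix_not_capitalized_sentences_py_alt raw_sentences
instance (raw_sentences : List String) (out : List String) : Decidable (Spec_fix_not_capitalized_sentences_py raw_sentences out) := by unfold Spec_fix_not_capitalized_sentences_py; infer_instance

-- ===== CLAIM (what is proved, stated in full; the proofs are below) =====
def Claim_equal_fix_not_capitalized_sentences_py : Prop := ∀ (raw_sentences : List String), Dom_fix_not_capitalized_sentences_py raw_sentences → Pre_fix_not_capitalized_sentences_py raw_sentences → Spec_fix_not_capitalized_sentences_py raw_sentences (fix_not_capitalized_sentences_py raw_sentences)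

-- ===== LEMMAS AND PROOFS =====

-- the common reference shape: one group per maximal run of lowerB-continuations
def pvG : List String → List String
  | [] => []
  | x :: t =>
      PySem.Str.join " " (x :: t.takeWhile pvLowerB) :: pvG (t.dropWhile pvLowerB)
termination_by l => l.length
decreasing_by simpa using Nat.lt_succ_of_le (List.length_dropWhile_le _ _)

theorem pvDropLenTakeWhile (t : List String) :
    t.drop (t.takeWhile pvLowerB).length = t.dropWhile pvLowerB := by
  induction t with
  | nil => rfl
  | cons a t ih =>
      by_cases h : pvLowerB a
      · rw [List.takeWhile_cons_of_pos h, List.dropWhile_cons_of_pos h]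
        simpa using ih
      · rw [List.takeWhile_cons_of_neg h, List.dropWhile_cons_of_neg h]
        rfl

theorem pvFindJ_eq (raw : List String) : ∀ (fuel j : Nat), raw.length ≤ j + fuel →
    pvFindJ raw fuel j = j + ((raw.drop j).takeWhile pvLowerB).length := by
  intro fuel
  induction fuel with
  | zero =>
      intro j h
      rw [pvFindJ, List.drop_eq_nil_of_le (by omega)]
      simp
  | succ fuel ih =>
      intro j h
      rw [pvFindJ]
      by_cases hj : j < raw.length
      · rw [if_pos hj]
        have hgd : raw.getD j "" = raw[j] := by
          rw [List.getD_eq_getElem?_getD, List.getElem?_eq_getElem hj]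
          rfl
        rw [List.drop_eq_getElem_cons hj]
        by_cases hl : pvLowerB (raw.getD j "")
        · rw [if_pos hl, ih (j + 1) (by omega),
              List.takeWhile_cons_of_pos (by rwa [hgd] at hl)]
          simp
          omega
        · rw [if_neg hl, List.takeWhile_cons_of_neg (by rwa [hgd] at hl)]
          simp
      · rw [if_neg hj, List.drop_eq_nil_of_le (by omega)]
        simp

-- " ".join of a singleton group
theorem pvJoin_singleton (g : String) : PySem.Str.join " " [g] = g := by
  apply String.toList_inj.mp
  rw [PySem.Str.toList_join, List.map_singleton, PySem.Chars.join_singleton]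

theorem pvJoin_cons_cons (a b : String) (l : List String) :
    PySem.Str.join " " (a :: b :: l) = a ++ " " ++ PySem.Str.join " " (b :: l) := by
  apply String.toList_inj.mp
  rw [PySem.Str.toList_join]
  simp only [List.map_cons, PySem.Chars.join_cons_cons, String.toList_append,
    PySem.Str.toList_join, List.map_cons]

theorem pvJoin_cons_append (a b : String) (l : List String) :
    PySem.Str.join " " ((a ++ b) :: l) = a ++ PySem.Str.join " " (b :: l) := by
  cases l with
  | nil => rw [pvJoin_singleton, pvJoin_singleton]
  | cons c l =>
      rw [pvJoin_cons_cons, pvJoin_cons_cons]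
      simp [String.append_assoc]

theorem pvAddLast_snoc (acc : List String) (x t : String) :
    pvAddLast (acc ++ [x]) t = acc ++ [x ++ t] := by
  induction acc with
  | nil => rfl
  | cons a acc ih =>
      cases acc with
      | nil => simp [pvAddLast]
      | cons b acc' => simpa [pvAddLast] using ih

theorem pvCapNe_eq (s : String) (hs : s.toList ≠ []) : pvCapNe s = some (pvLowerB s) := by
  obtain ⟨c, cs, hc⟩ : ∃ c cs, s.toList = c :: cs := by
    cases h : s.toList with
    | nil => exact absurd h hs
    | cons c cs => exact ⟨c, cs, rfl⟩
  rw [pvCapNe, pvLowerB, hc, PySem.List.pyGet?_zero_cons]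
  rfl

-- A's loop over a run of lowercase-starting sentences joins the whole run onto the last element
theorem pvFoldRun (run : List String) :
    ∀ (acc : List String) (x : String),
    (∀ s ∈ run, s.toList ≠ [] ∧ pvLowerB s = true) →
    run.foldl pvStepA (acc ++ [x]) = acc ++ [PySem.Str.join " " (x :: run)] := by
  induction run with
  | nil => intro acc x _; simp [pvJoin_singleton]
  | cons r run' ih =>
      intro acc x hrun
      obtain ⟨hne, hl⟩ := hrun r (by simp)
      have hstep : pvStepA (acc ++ [x]) r = acc ++ [x ++ " " ++ r] := by
        rw [pvStepA, pvCapNe_eq r hne, hl]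
        simp only [List.length_append, List.length_cons]
        rw [if_pos (by simp), pvAddLast_snoc, ← String.append_assoc]
      rw [List.foldl_cons, hstep, ih acc (x ++ " " ++ r) (fun s hs => hrun s (by simp [hs])),
          pvJoin_cons_append, pvJoin_cons_cons]

theorem pvHead_dropWhile (t : List String) (x : String)
    (hx : (t.dropWhile pvLowerB).head? = some x) : pvLowerB x = false := by
  induction t with
  | nil => simp [List.dropWhile] at hx
  | cons a t ih =>
      rw [List.dropWhile_cons] at hx
      by_cases h : pvLowerB a
      · rw [if_pos h] at hx; exact ih hx
      · rw [if_neg h] at hx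
        simp at hx
        subst hx
        simpa using h

-- main invariant: A's fold from acc equals acc ++ pvG, provided the head cannot merge into acc
theorem pvMainAux : ∀ (n : Nat) (l : List String), l.length ≤ n → (∀ s ∈ l, s.toList ≠ []) →
    ∀ (acc : List String), (acc = [] ∨ ∀ x, l.head? = some x → pvLowerB x = false) →
    l.foldl pvStepA acc = acc ++ pvG l := by
  intro n
  induction n with
  | zero =>
    intro l hlen _ acc _
    have : l = [] := List.length_eq_zero_iff.mp (by omega)
    subst this; simp [pvG]
  | succ n IH =>
    intro l hlen hl acc hacc
    match l with
    | [] => simp [pvG]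
    | x :: t =>
      have hxne : x.toList ≠ [] := hl x (by simp)
      have hstep : pvStepA acc x = acc ++ [x] := by
        rw [pvStepA, pvCapNe_eq x hxne]
        cases hb : pvLowerB x with
        | false => rfl
        | true =>
            have : acc = [] := by
              rcases hacc with h | h
              · exact h
              · exact absurd (h x rfl) (by simp [hb])
            subst this; rfl
      have hsplit : t = t.takeWhile pvLowerB ++ t.dropWhile pvLowerB :=
        (List.takeWhile_append_dropWhile).symm
      have hrunmem : ∀ s ∈ t.takeWhile pvLowerB, s.toList ≠ [] ∧ pvLowerB s = true := by
        intro s hs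
        exact ⟨hl s (List.mem_cons_of_mem x ((List.takeWhile_sublist _).subset hs)),
               List.mem_takeWhile_imp hs⟩
      calc (x :: t).foldl pvStepA acc
          = t.foldl pvStepA (acc ++ [x]) := by rw [List.foldl_cons, hstep]
        _ = (t.dropWhile pvLowerB).foldl pvStepA
              ((t.takeWhile pvLowerB).foldl pvStepA (acc ++ [x])) := by
              conv_lhs => rw [hsplit]
              rw [List.foldl_append]
        _ = (t.dropWhile pvLowerB).foldl pvStepA
              (acc ++ [PySem.Str.join " " (x :: t.takeWhile pvLowerB)]) := by
              rw [pvFoldRun _ acc x hrunmem]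
        _ = acc ++ [PySem.Str.join " " (x :: t.takeWhile pvLowerB)] ++ pvG (t.dropWhile pvLowerB) := by
              apply IH _ (by
                have := List.length_dropWhile_le (p := pvLowerB) (l := t)
                simp at hlen; omega)
              · intro s hs
                exact hl s (List.mem_cons_of_mem x ((List.dropWhile_sublist _).subset hs))
              · right; intro y hy; exact pvHead_dropWhile t y hy
        _ = acc ++ pvG (x :: t) := by rw [pvG]; simp
 
theorem pvMain (l : List String) (hl : ∀ s ∈ l, s.toList ≠ [])
    (acc : List String) (hacc : acc = [] ∨ ∀ x, l.head? = some x → pvLowerB x = false) :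
    l.foldl pvStepA acc = acc ++ pvG l :=
  pvMainAux l.length l le_rfl hl acc hacc

theorem pvOuter_eq (raw : List String) : ∀ (fuel i : Nat) (out : List String),
    raw.length ≤ i + fuel → pvOuter raw fuel i out = out ++ pvG (raw.drop i) := by
  intro fuel
  induction fuel with
  | zero =>
      intro i out h
      rw [pvOuter, List.drop_eq_nil_of_le (by omega)]
      simp [pvG]
  | succ fuel ih =>
      intro i out h
      by_cases hi : i < raw.length
      · rw [pvOuter, if_pos hi]
        have hjeq : pvFindJ raw raw.length (i + 1)
            = (i + 1) + ((raw.drop (i + 1)).takeWhile pvLowerB).length :=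
          pvFindJ_eq raw raw.length (i + 1) (by omega)
        have hdrop : raw.drop i = raw[i] :: raw.drop (i + 1) := List.drop_eq_getElem_cons hi
        have htake : (raw.drop (i + 1)).take ((raw.drop (i + 1)).takeWhile pvLowerB).length
            = (raw.drop (i + 1)).takeWhile pvLowerB :=
          (List.prefix_iff_eq_take.mp (List.takeWhile_prefix _)).symm
        have hslice : PySem.List.slice raw (some (i : Int)) (some ((pvFindJ raw raw.length (i + 1) : Nat) : Int))
            = raw[i] :: (raw.drop (i + 1)).takeWhile pvLowerB := by
          rw [PySem.List.slice_natCast, hdrop, hjeq]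
          have : (i + 1) + ((raw.drop (i + 1)).takeWhile pvLowerB).length - i
              = ((raw.drop (i + 1)).takeWhile pvLowerB).length + 1 := by omega
          rw [this, List.take_succ_cons, htake]
        have hdropj : raw.drop (pvFindJ raw raw.length (i + 1)) = (raw.drop (i + 1)).dropWhile pvLowerB := by
          rw [hjeq, ← List.drop_drop, pvDropLenTakeWhile]
        rw [ih _ _ (by rw [hjeq]; omega), hslice, hdropj, hdrop, pvG]
        simp
      · rw [pvOuter, if_neg hi, List.drop_eq_nil_of_le (by omega)]
        simp [pvG]

-- ===== VERDICT (by name: the statement is the Claim_ definition above) =====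
theorem fix_not_capitalized_sentences_py_spec : Claim_equal_fix_not_capitalized_sentences_py := by
  intro raw_sentences _ hpre
  unfold Spec_fix_not_capitalized_sentences_py
  unfold fix_not_capitalized_sentences_py fix_not_capitalized_sentences_py_alt
  have hl : ∀ s ∈ raw_sentences, s.toList ≠ [] := by
    intro s hs h
    exact hpre s hs (String.toList_inj.mp (by simp [h]))
  rw [pvOuter_eq raw_sentences raw_sentences.length 0 [] (by omega), pvMain raw_sentences hl [] (Or.inl rfl)]
  simp
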